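-- pv_equiv track=rewrite | github.com/lorenzotaccini/pyFunMQTT | Utils/UserFunctions/user_functions.py | split_table_by_columns
-- ===== SOURCE A (Python) =====
-- def split_table_by_columns(table, n):
--     """
--     Divide una tabella (lista di dizionari) in n parti, suddividendo le colonne.
--
--     Args:
--     - table (list of dict): La tabella originale da dividere.
--     - n (int): Il numero di parti in cui dividere la tabella.
--
--     Returns:
--     - list of list of dict: Una lista contenente n tabelle suddivise per colonne.
--     """
--     if not table:
--         return [[] for _ in range(n)]
--
--     # Estrai tutte le chiavi (colonne) dalla prima riga
--     keys = list(table[0].keys())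
--
--     # Calcola il numero di colonne per ciascuna sottotabella
--     total_columns = len(keys)
--     avg_columns = total_columns // n
--     remainder = total_columns % n
--
--     # Lista per contenere le sottotabelle
--     sub_tables = [[] for _ in range(n)]
--
--     # Inizializza gli indici di partenza e fine per le colonne
--     start_index = 0
--
--     for i in range(n):
--         # Calcola la lunghezza della sottotabella corrente
--         end_index = start_index + avg_columns + (1 if i < remainder else 0)
--
--         # Seleziona le colonne per la sottotabella corrente
--         current_keys = keys[start_index:end_index]
--
--         # Costruisce la sottotabella corrente con solo le colonne selezionate
--         for row in table:
--             sub_table_row = {key: row[key] for key in current_keys}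
--             sub_tables[i].append(sub_table_row)
--
--         # Aggiorna l'indice di partenza per la prossima iterazione
--         start_index = end_index
--
--     return sub_tables
-- ===== SOURCE B (Python) =====
-- def split_table_by_columns(table, n):
--     sub_tables = [[] for _ in range(n)]
--     if not table or n <= 0:
--         return sub_tables
--     keys = list(table[0].keys())
--     q, r = divmod(len(keys), n)
--     cut = r * (q + 1)  # positions below cut belong to the r larger groups
--     # map a column position to its group: arithmetic inverse of the remainder-first sizing
--     def group_of(j):
--         return j // (q + 1) if j < cut else r + (j - cut) // q
--     for row in table:
--         parts = [{} for _ in range(n)]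
--         for j, key in enumerate(keys):
--             parts[group_of(j)][key] = row[key]
--         for g in range(n):
--             sub_tables[g].append(parts[g])
--     return sub_tables
-- ===== Notes on version B (the rewrite author's own statement) =====
-- stated objective: alternative
-- what changed: Eliminates key-chunk slicing entirely: instead of A's group-major slice-and-project, B computes an arithmetic position-to-group mapping (inverse of the remainder-first sizing) and does one row-major pass inserting each cell of a row directly into that row's fresh per-group dict.
import Mathlib
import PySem

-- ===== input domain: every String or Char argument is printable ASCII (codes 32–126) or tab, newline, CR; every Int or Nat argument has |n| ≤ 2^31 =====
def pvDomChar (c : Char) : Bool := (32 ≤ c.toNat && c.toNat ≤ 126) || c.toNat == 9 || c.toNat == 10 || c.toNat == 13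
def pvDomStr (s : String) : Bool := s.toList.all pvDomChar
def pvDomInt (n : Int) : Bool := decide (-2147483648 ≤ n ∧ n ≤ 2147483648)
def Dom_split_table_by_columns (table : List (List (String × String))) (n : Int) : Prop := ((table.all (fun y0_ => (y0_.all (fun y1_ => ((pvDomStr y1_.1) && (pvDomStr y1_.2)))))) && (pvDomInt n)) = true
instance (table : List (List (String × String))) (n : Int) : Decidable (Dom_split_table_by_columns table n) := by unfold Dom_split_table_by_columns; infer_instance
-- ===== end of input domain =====

-- B replaces A's group-major slice-and-copy with an arithmetic position→group mapping and a
-- row-major scatter that inserts each cell directly into its group's dict; return values proved equal.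

-- ===== PORT A =====
-- {key: row[key] for key in current_keys}; rows are Python dicts, encoded as assoc lists
-- (PySem.Dict.ofList); row[key] is get? — none (KeyError) is excluded by Pre_, so .getD "" is unreachable.
def pvRowA (row : List (String × String)) (ks : List String) : List (String × String) :=
  (ks.foldl (fun d k => d.insert k (((PySem.Dict.ofList row).get? k).getD "")) PySem.Dict.empty).items

def split_table_by_columns (table : List (List (String × String))) (n : Int) :
    List (List (List (String × String))) :=
  if table = [] then (PySem.List.pyRange 0 n 1).map (fun _ => [])
  else
    let keys := (PySem.Dict.ofList (table.headD [])).keys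
    let avg := PySem.Int.floordiv (keys.length : Int) n   -- n = 0 (ZeroDivisionError) excluded by Pre_
    let rem := PySem.Int.mod (keys.length : Int) n
    ((PySem.List.pyRange 0 n 1).foldl
      (fun (st : List (List (List (String × String))) × Int) i =>
        -- end_index = start_index + avg_columns + (1 if i < remainder else 0); current_keys = keys[start:end]
        -- for row in table: sub_tables[i].append({key: row[key] for key in current_keys})
        -- (i ranges over range(n), hence i ≥ 0 and .toNat is exact)
        (table.foldl
          (fun subs row => subs.set i.toNat (subs.getD i.toNat [] ++
            [pvRowA row (PySem.List.slice keys (some st.2)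
               (some (st.2 + avg + (if i < rem then (1 : Int) else 0))))])) st.1,
         st.2 + avg + (if i < rem then (1 : Int) else 0)))
      ((PySem.List.pyRange 0 n 1).map (fun _ => []), (0 : Int))).1

-- ===== PORT B =====
-- group_of(j) = j // (q+1) if j < cut else r + (j - cut) // q; in Python the else branch is never
-- evaluated with q = 0 (then cut = total), so the total Lean floordiv is exact on reached inputs.
def pvGrp (q r cut j : Int) : Int :=
  if j < cut then PySem.Int.floordiv j (q + 1)
  else r + PySem.Int.floordiv (j - cut) q

def split_table_by_columns_alt (table : List (List (String × String))) (n : Int) :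
    List (List (List (String × String))) :=
  let sub_tables : List (List (List (String × String))) := (PySem.List.pyRange 0 n 1).map (fun _ => [])
  if table = [] ∨ n ≤ 0 then sub_tables
  else
    let keys := (PySem.Dict.ofList (table.headD [])).keys
    -- q, r = divmod(len(keys), n); n ≠ 0 here, so the .getD default is unreachable
    let qr := (PySem.Int.divmod? (keys.length : Int) n).getD (0, 0)
    let cut := qr.2 * (qr.1 + 1)
    table.foldl
      (fun subs row =>
        -- parts = [{} for _ in range(n)]; for j, key in enumerate(keys): parts[group_of(j)][key] = row[key]
        -- (group_of(j) is ≥ 0 for every reached j, so .toNat is exact)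
        let parts := (PySem.List.enumerate keys 0).foldl
          (fun parts jk =>
            parts.set (pvGrp qr.1 qr.2 cut jk.1).toNat
              ((parts.getD (pvGrp qr.1 qr.2 cut jk.1).toNat PySem.Dict.empty).insert jk.2
                (((PySem.Dict.ofList row).get? jk.2).getD "")))
          ((PySem.List.pyRange 0 n 1).map (fun _ => PySem.Dict.empty))
        -- for g in range(n): sub_tables[g].append(parts[g])
        (PySem.List.pyRange 0 n 1).foldl
          (fun s g => s.set g.toNat (s.getD g.toNat [] ++ [(parts.getD g.toNat PySem.Dict.empty).items]))
          subs)
      sub_tables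

-- ===== PRECONDITION & SPEC =====
-- Pre_ excludes exactly the inputs where the Python A raises: n = 0 with a nonempty table
-- (ZeroDivisionError), and, for n > 0, a key of the first row missing from a later row (KeyError).
def Pre_split_table_by_columns (table : List (List (String × String))) (n : Int) : Prop :=
  (table ≠ [] → n ≠ 0) ∧
  (0 < n → ∀ row ∈ table, ∀ k ∈ (PySem.Dict.ofList (table.headD [])).keys,
    (PySem.Dict.ofList row).contains k = true)
instance (table : List (List (String × String))) (n : Int) : Decidable (Pre_split_table_by_columns table n) := by
  unfold Pre_split_table_by_columns; infer_instance

def pvWitness_split_table_by_columns : (List (List (String × String))) × Int :=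
  ([[("a", "1"), ("b", "2")], [("a", "3"), ("b", "4")]], 2)

def Spec_split_table_by_columns (table : List (List (String × String))) (n : Int) (out : List (List (List (String × String)))) : Prop := out = split_table_by_columns_alt table n
instance (table : List (List (String × String))) (n : Int) (out : List (List (List (String × String)))) : Decidable (Spec_split_table_by_columns table n out) := by unfold Spec_split_table_by_columns; infer_instance

-- ===== CLAIM (what is proved, stated in full; the proofs are below) =====
def Claim_equal_split_table_by_columns : Prop := ∀ (table : List (List (String × String))) (n : Int), Dom_split_table_by_columns table n → Pre_split_table_by_columns table n → Spec_split_table_by_columns table n (split_table_by_columns table n)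

-- ===== LEMMAS AND PROOFS =====

-- A's inner row loop at bucket I just appends table.map mk to that bucket.
theorem pv_inner_loop {ρ R : Type} (tb : List ρ) (mk : ρ → R) :
    ∀ (subs : List (List R)) (I : Nat), I < subs.length →
      tb.foldl (fun subs row => subs.set I (subs.getD I [] ++ [mk row])) subs
        = subs.set I (subs.getD I [] ++ tb.map mk) := by
  induction tb with
  | nil =>
    intro subs I hI
    simp only [List.foldl_nil, List.map_nil, List.append_nil]
    rw [List.getD_eq_getElem _ _ hI, List.set_getElem_self hI]
  | cons r rs ih =>
    intro subs I hI
    simp only [List.foldl_cons, List.map_cons]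
    rw [ih _ I (by simpa using hI)]
    have h1 : I < (subs.set I (subs.getD I [] ++ [mk r])).length := by simpa using hI
    rw [List.getD_eq_getElem _ _ h1, List.getElem_set_self (by simpa using hI), List.set_set]
    simp

-- A's group-major fold, characterised: after k of the n iterations the first k buckets are
-- filled with the slices at the closed-form boundaries j*avg + min j rem, and start_index is at k's boundary.
theorem pv_A_inv (keys : List String) (table : List (List (String × String)))
    (avg rem : Int) (hrem : 0 ≤ rem) (N : Nat) :
    ∀ k : Nat, k ≤ N →
      (PySem.List.pyRange 0 (k : Int) 1).foldl
        (fun (st : List (List (List (String × String))) × Int) i =>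
          (table.foldl
            (fun subs row => subs.set i.toNat (subs.getD i.toNat [] ++
              [pvRowA row (PySem.List.slice keys (some st.2)
                 (some (st.2 + avg + (if i < rem then (1 : Int) else 0))))])) st.1,
           st.2 + avg + (if i < rem then (1 : Int) else 0)))
        ((List.range N).map (fun _ => []), (0 : Int))
      = ((List.range N).map (fun j =>
            if j < k then
              table.map (fun row => pvRowA row (PySem.List.slice keys
                (some ((j : Int) * avg + min (j : Int) rem))
                (some (((j : Int) + 1) * avg + min ((j : Int) + 1) rem))))
            else []),
         (k : Int) * avg + min (k : Int) rem) := by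
  intro k
  induction k with
  | zero =>
    intro _
    rw [PySem.List.pyRange_one_eq_nil (by norm_num)]
    simp [min_eq_left hrem]
  | succ k ih =>
    intro hk
    have hk' : k ≤ N := Nat.le_of_succ_le hk
    have hkN : k < N := hk
    have hstep : ((k : Int) + 1) = ((k + 1 : Nat) : Int) := by push_cast; ring
    rw [← hstep, PySem.List.pyRange_one_succ_right (by positivity), List.foldl_append, ih hk']
    simp only [List.foldl_cons, List.foldl_nil]
    have htonat : ((k : Int)).toNat = k := Int.toNat_natCast k
    have hmin : min ((k : Int) + 1) rem = min (k : Int) rem + (if (k : Int) < rem then 1 else 0) := by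
      split_ifs with h <;> omega
    have hend : (k : Int) * avg + min (k : Int) rem + avg + (if (k : Int) < rem then (1 : Int) else 0)
        = ((k : Int) + 1) * avg + min ((k : Int) + 1) rem := by
      have hmul : ((k : Int) + 1) * avg = (k : Int) * avg + avg := by ring
      omega
    have hgetD : (((List.range N).map (fun j =>
        if j < k then
          table.map (fun row => pvRowA row (PySem.List.slice keys
            (some ((j : Int) * avg + min (j : Int) rem))
            (some (((j : Int) + 1) * avg + min ((j : Int) + 1) rem))))
        else [])).getD k []) = ([] : List (List (String × String))) := by
      rw [List.getD_eq_getElem _ _ (by simpa using hkN)]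
      simp
    rw [htonat, pv_inner_loop _ _ _ k (by simpa using hkN), hgetD]
    refine Prod.ext ?_ ?_
    · apply List.ext_getElem (by simp)
      intro j hj1 hj2
      simp only [List.length_set, List.length_map, List.length_range] at hj1
      rw [List.getElem_set]
      by_cases hjk : j = k
      · subst hjk
        simp only [List.getElem_map, List.getElem_range]
        rw [if_pos (Nat.lt_succ_self j)]
        simp only [List.nil_append]
        rw [hend]
        simp
      · rw [if_neg (fun h => hjk h.symm)]
        simp only [List.getElem_map, List.getElem_range]
        by_cases hjlt : j < k
        · rw [if_pos hjlt, if_pos (Nat.lt_succ_of_lt hjlt)]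
        · rw [if_neg hjlt, if_neg (by omega)]
    · simpa using hend

-- bounds of the position→group mapping
theorem pv_grp_bounds (t n q r j : Int) (hn : 0 < n) (hq0 : 0 ≤ q) (hr0 : 0 ≤ r) (hrn : r < n)
    (heq : q * n + r = t) (hj0 : 0 ≤ j) (hjt : j < t) :
    0 ≤ pvGrp q r (r * (q + 1)) j ∧ pvGrp q r (r * (q + 1)) j < n := by
  unfold pvGrp
  by_cases hj : j < r * (q + 1)
  · rw [if_pos hj]
    have hd : (0 : Int) < q + 1 := by omega
    have hrpos : 0 < r := by
      by_contra h
      have : r * (q + 1) ≤ 0 := mul_nonpos_of_nonpos_of_nonneg (by omega) (by omega)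
      omega
    refine ⟨?_, ?_⟩
    · rw [PySem.Int.floordiv_eq_ediv_of_pos hd]
      exact Int.ediv_nonneg hj0 (by omega)
    · have hlt : PySem.Int.floordiv j (q + 1) < r :=
        (PySem.Int.floordiv_lt_iff_lt_mul hd).mpr hj
      omega
  · rw [if_neg hj]
    push_neg at hj
    have hq : 0 < q := by
      by_contra h
      have hq0' : q = 0 := by omega
      subst hq0'
      simp at hj heq
      omega
    have hnonneg : 0 ≤ PySem.Int.floordiv (j - r * (q + 1)) q := by
      rw [PySem.Int.floordiv_eq_ediv_of_pos hq]
      exact Int.ediv_nonneg (by omega) hq.le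
    have hexp : (n - r) * q + r * (q + 1) = q * n + r := by ring
    have hlt : PySem.Int.floordiv (j - r * (q + 1)) q < n - r :=
      (PySem.Int.floordiv_lt_iff_lt_mul hq).mpr (by linarith)
    omega

-- the mapping inverts the remainder-first sizing: group g holds exactly positions [g*q+min g r, (g+1)*q+min (g+1) r)
theorem pv_grp_eq_iff (t n q r j g : Int) (hn : 0 < n) (hq0 : 0 ≤ q) (hr0 : 0 ≤ r) (hrn : r < n)
    (heq : q * n + r = t) (hj0 : 0 ≤ j) (hjt : j < t) (hg0 : 0 ≤ g) :
    pvGrp q r (r * (q + 1)) j = g ↔ g * q + min g r ≤ j ∧ j < (g + 1) * q + min (g + 1) r := by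
  unfold pvGrp
  by_cases hj : j < r * (q + 1)
  · rw [if_pos hj, PySem.Int.floordiv_eq_iff_of_pos (show (0 : Int) < q + 1 by omega)]
    by_cases hgr : g < r
    · rw [min_eq_left (by omega : g ≤ r), min_eq_left (by omega : g + 1 ≤ r)]
      have e1 : g * (q + 1) = g * q + g := by ring
      have e2 : (g + 1) * (q + 1) = (g + 1) * q + (g + 1) := by ring
      constructor
      · rintro ⟨a, b⟩; exact ⟨by linarith, by linarith⟩
      · rintro ⟨a, b⟩; exact ⟨by linarith, by linarith⟩
    · push_neg at hgr
      rw [min_eq_right hgr, min_eq_right (by omega : r ≤ g + 1)]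
      have hle : r * q ≤ g * q := mul_le_mul_of_nonneg_right (by omega) hq0
      have hle2 : r * (q + 1) ≤ g * (q + 1) := mul_le_mul_of_nonneg_right (by omega) (by omega)
      have e1 : r * (q + 1) = r * q + r := by ring
      have e2 : g * (q + 1) = g * q + g := by ring
      constructor
      · rintro ⟨a, b⟩; exfalso; linarith
      · rintro ⟨a, b⟩; exfalso; linarith
  · rw [if_neg hj]
    push_neg at hj
    have hq : 0 < q := by
      by_contra h
      have hq0' : q = 0 := by omega
      subst hq0'
      simp at hj heq
      omega
    have key : (r + PySem.Int.floordiv (j - r * (q + 1)) q = g) ↔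
        PySem.Int.floordiv (j - r * (q + 1)) q = g - r := by omega
    rw [key, PySem.Int.floordiv_eq_iff_of_pos hq]
    have e1 : (g - r) * q = g * q - r * q := by ring
    have e2 : (g - r + 1) * q = g * q + q - r * q := by ring
    have e3 : r * (q + 1) = r * q + r := by ring
    have e4 : (g + 1) * q = g * q + q := by ring
    by_cases hgr : r ≤ g
    · rw [min_eq_right hgr, min_eq_right (by omega : r ≤ g + 1)]
      constructor
      · rintro ⟨a, b⟩; exact ⟨by linarith, by linarith⟩
      · rintro ⟨a, b⟩; exact ⟨by linarith, by linarith⟩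
    · push_neg at hgr
      rw [min_eq_left (by omega : g ≤ r), min_eq_left (by omega : g + 1 ≤ r)]
      have hle : (g + 1) * q ≤ r * q := mul_le_mul_of_nonneg_right (by omega) hq0
      constructor
      · rintro ⟨a, b⟩; exfalso; linarith
      · rintro ⟨a, b⟩; exfalso; linarith

-- keep the indexed cells whose position lies in [s, e): that is a contiguous take/drop
theorem pv_filtmap {α : Type} (s e : Int) (hs : 0 ≤ s) (he : 0 ≤ e) :
    ∀ (xs : List α) (k : Nat),
      (((PySem.List.enumerate xs (k : Int)).filter
          (fun p => decide (s ≤ p.1 ∧ p.1 < e))).map (·.2))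
        = (xs.take (e.toNat - k)).drop (s.toNat - k) := by
  intro xs
  induction xs with
  | nil => intro k; simp [PySem.List.enumerate_nil]
  | cons x xs ih =>
    intro k
    rw [PySem.List.enumerate_cons, List.filter_cons]
    have hcast : ((k : Int) + 1) = ((k + 1 : Nat) : Int) := by push_cast; ring
    by_cases hp : s ≤ (k : Int) ∧ (k : Int) < e
    · rw [if_pos (by simpa using hp)]
      simp only [List.map_cons]
      rw [hcast, ih (k + 1)]
      rw [show e.toNat - k = (e.toNat - (k + 1)) + 1 from by omega,
          show s.toNat - k = 0 from by omega,
          show s.toNat - (k + 1) = 0 from by omega]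
      simp [List.take_succ_cons]
    · rw [if_neg (by simpa using hp)]
      rw [hcast, ih (k + 1)]
      by_cases hek : (k : Int) < e
      · have hks : ¬ s ≤ (k : Int) := fun h => hp ⟨h, hek⟩
        rw [show e.toNat - k = (e.toNat - (k + 1)) + 1 from by omega,
            show s.toNat - k = (s.toNat - (k + 1)) + 1 from by omega]
        simp [List.take_succ_cons, List.drop_succ_cons]
      · rw [show e.toNat - k = 0 from by omega,
            show e.toNat - (k + 1) = 0 from by omega]
        simp

-- the scatter fold, observed at one bucket g: only the cells mapped to g land there, in order
theorem pv_scatter_get (avg rem cut : Int) (row : List (String × String)) :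
    ∀ (pairs : List (Int × String)) (parts : List (PySem.Dict String String)) (g : Nat),
      g < parts.length →
      ((pairs.foldl
          (fun parts jk =>
            parts.set (pvGrp avg rem cut jk.1).toNat
              ((parts.getD (pvGrp avg rem cut jk.1).toNat PySem.Dict.empty).insert jk.2
                (((PySem.Dict.ofList row).get? jk.2).getD "")))
          parts).getD g PySem.Dict.empty)
        = (pairs.filter (fun jk => (pvGrp avg rem cut jk.1).toNat == g)).foldl
            (fun x jk => x.insert jk.2 (((PySem.Dict.ofList row).get? jk.2).getD ""))
            (parts.getD g PySem.Dict.empty) := by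
  intro pairs
  induction pairs with
  | nil => intro parts g hg; rfl
  | cons p ps ih =>
    intro parts g hg
    simp only [List.foldl_cons, List.filter_cons]
    by_cases hig : (pvGrp avg rem cut p.1).toNat = g
    · rw [if_pos (by simpa using hig)]
      rw [ih _ g (by simpa using hg)]
      simp only [List.foldl_cons]
      congr 1
      rw [hig, List.getD_eq_getElem _ _ (by simpa using hg),
          List.getElem_set_self (by simpa using hg), List.getD_eq_getElem _ _ hg]
    · rw [if_neg (by simpa using hig)]
      rw [ih _ g (by simpa using hg)]
      congr 1
      rw [List.getD_eq_getElem _ _ (by simpa using hg), List.getD_eq_getElem _ _ hg,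
          List.getElem_set_ne hig]

-- a fold whose step functions agree on every state satisfying a preserved invariant
theorem pv_foldl_inv_congr {σ ρ : Type} (Inv : σ → Prop) (F1 F2 : σ → ρ → σ) :
    ∀ (l : List ρ) (init : σ), Inv init →
      (∀ s r, Inv s → F1 s r = F2 s r ∧ Inv (F1 s r)) →
      l.foldl F1 init = l.foldl F2 init := by
  intro l
  induction l with
  | nil => intro init _ _; rfl
  | cons r rs ih =>
    intro init hinv hstep
    simp only [List.foldl_cons]
    rw [(hstep init r hinv).1]
    exact ih _ (by rw [← (hstep init r hinv).1]; exact (hstep init r hinv).2) hstep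

-- the per-row g-loop 'sub_tables[g].append(parts[g]) for g in range(N)' as a mapIdx
theorem pv_gloop {X : Type} (N : Nat) (f : Nat → X) :
    ∀ (subs : List (List X)),
      (List.range N).foldl (fun s g => s.set g (s.getD g [] ++ [f g])) subs
        = subs.mapIdx (fun g b => if g < N then b ++ [f g] else b) := by
  induction N with
  | zero =>
    intro subs
    simp only [List.range_zero, List.foldl_nil]
    apply List.ext_getElem (by simp)
    intro i h1 h2
    simp
  | succ N ih =>
    intro subs
    rw [List.range_succ, List.foldl_append, ih]
    simp only [List.foldl_cons, List.foldl_nil]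
    by_cases hN : N < subs.length
    · apply List.ext_getElem (by simp)
      intro i h1 h2
      simp only [List.length_set, List.length_mapIdx] at h1
      rw [List.getElem_set]
      by_cases hiN : N = i
      · subst hiN
        rw [if_pos rfl, List.getD_eq_getElem _ _ (by simpa using hN)]
        simp only [List.getElem_mapIdx]
        rw [if_neg (by omega), if_pos (by omega)]
      · rw [if_neg hiN]
        simp only [List.getElem_mapIdx]
        by_cases hlt : i < N
        · rw [if_pos hlt, if_pos (by omega)]
        · rw [if_neg hlt, if_neg (by omega)]
    · rw [List.set_eq_of_length_le (by simp; omega)]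
      apply List.ext_getElem (by simp)
      intro i h1 h2
      simp only [List.length_mapIdx] at h1
      simp only [List.getElem_mapIdx]
      rw [if_pos (by omega), if_pos (by omega)]

-- folding the per-row mapIdx-append over all rows appends each row's cell list per bucket
theorem pv_rows {ρ X : Type} (P : ρ → Nat → X) (tb : List ρ) :
    ∀ (subs : List (List X)),
      tb.foldl (fun s row => s.mapIdx (fun g b => b ++ [P row g])) subs
        = subs.mapIdx (fun g b => b ++ tb.map (fun row => P row g)) := by
  induction tb with
  | nil =>
    intro subs
    simp only [List.foldl_nil, List.map_nil, List.append_nil]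
    apply List.ext_getElem (by simp)
    intro i h1 h2
    simp
  | cons r rs ih =>
    intro subs
    simp only [List.foldl_cons, List.map_cons]
    rw [ih]
    apply List.ext_getElem (by simp)
    intro i h1 h2
    simp only [List.getElem_mapIdx]
    simp

-- one row, one bucket: the scattered dict at bucket g is exactly the projection onto g's key slice
theorem pv_parts_items (keys : List String) (row : List (String × String)) (n avg rem : Int)
    (hn : 0 < n) (hq0 : 0 ≤ avg) (hr0 : 0 ≤ rem) (hrn : rem < n)
    (heq : avg * n + rem = (keys.length : Int)) (g : Nat) (hg : g < n.toNat) :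
    (((PySem.List.enumerate keys 0).foldl
        (fun parts jk =>
          parts.set (pvGrp avg rem (rem * (avg + 1)) jk.1).toNat
            ((parts.getD (pvGrp avg rem (rem * (avg + 1)) jk.1).toNat PySem.Dict.empty).insert jk.2
              (((PySem.Dict.ofList row).get? jk.2).getD "")))
        ((PySem.List.pyRange 0 n 1).map (fun _ => PySem.Dict.empty))).getD g PySem.Dict.empty).items
      = pvRowA row (PySem.List.slice keys (some ((g : Int) * avg + min (g : Int) rem))
          (some (((g : Int) + 1) * avg + min ((g : Int) + 1) rem))) := by
  have hlen : ((PySem.List.pyRange 0 n 1).map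
      (fun _ => (PySem.Dict.empty : PySem.Dict String String))).length = n.toNat := by
    simp [PySem.List.length_pyRange_one]
  rw [pv_scatter_get avg rem (rem * (avg + 1)) row (PySem.List.enumerate keys 0) _ g
      (by rw [hlen]; exact hg)]
  have hinit : (((PySem.List.pyRange 0 n 1).map
      (fun _ => (PySem.Dict.empty : PySem.Dict String String))).getD g PySem.Dict.empty)
      = PySem.Dict.empty := by
    rw [List.getD_eq_getElem _ _ (by rw [hlen]; exact hg)]
    simp
  rw [hinit]
  have hs0 : 0 ≤ (g : Int) * avg + min (g : Int) rem :=
    add_nonneg (mul_nonneg (Int.natCast_nonneg g) hq0) (le_min (Int.natCast_nonneg g) hr0)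
  have he0 : 0 ≤ ((g : Int) + 1) * avg + min ((g : Int) + 1) rem :=
    add_nonneg (mul_nonneg (by positivity) hq0) (le_min (by positivity) hr0)
  have hfc : (PySem.List.enumerate keys 0).filter
        (fun jk => (pvGrp avg rem (rem * (avg + 1)) jk.1).toNat == g)
      = (PySem.List.enumerate keys 0).filter
        (fun p => decide ((g : Int) * avg + min (g : Int) rem ≤ p.1 ∧
          p.1 < ((g : Int) + 1) * avg + min ((g : Int) + 1) rem)) := by
    apply List.filter_congr
    intro p hp
    rcases (PySem.List.mem_enumerate_iff keys 0 p).mp hp with ⟨k, hk, rfl⟩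
    have hj0 : (0 : Int) ≤ 0 + (k : Int) := by positivity
    have hjt : (0 : Int) + (k : Int) < (keys.length : Int) := by push_cast; omega
    have hb := pv_grp_bounds (keys.length : Int) n avg rem (0 + (k : Int)) hn hq0 hr0 hrn heq hj0 hjt
    have hiff := pv_grp_eq_iff (keys.length : Int) n avg rem (0 + (k : Int)) (g : Int) hn hq0 hr0 hrn
      heq hj0 hjt (Int.natCast_nonneg g)
    rw [Bool.eq_iff_iff]
    simp only [beq_iff_eq, decide_eq_true_eq]
    rw [show ((pvGrp avg rem (rem * (avg + 1)) (0 + (k : Int))).toNat = g) ↔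
        (pvGrp avg rem (rem * (avg + 1)) (0 + (k : Int)) = (g : Int)) from by omega, hiff]
  rw [hfc]
  rw [show ((PySem.List.enumerate keys 0).filter
        (fun p => decide ((g : Int) * avg + min (g : Int) rem ≤ p.1 ∧
          p.1 < ((g : Int) + 1) * avg + min ((g : Int) + 1) rem))).foldl
        (fun x jk => x.insert jk.2 (((PySem.Dict.ofList row).get? jk.2).getD ""))
        PySem.Dict.empty
      = (((PySem.List.enumerate keys 0).filter
        (fun p => decide ((g : Int) * avg + min (g : Int) rem ≤ p.1 ∧
          p.1 < ((g : Int) + 1) * avg + min ((g : Int) + 1) rem))).map (·.2)).foldl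
        (fun d k => d.insert k (((PySem.Dict.ofList row).get? k).getD ""))
        PySem.Dict.empty from (List.foldl_map (f := fun x : Int × String => x.2) (g := fun (d : PySem.Dict String String) (k : String) => d.insert k (((PySem.Dict.ofList row).get? k).getD ""))).symm]
  rw [show (PySem.List.enumerate keys (0 : Int)) = (PySem.List.enumerate keys ((0 : Nat) : Int))
      from by norm_num]
  rw [pv_filtmap _ _ hs0 he0 keys 0]
  simp only [Nat.sub_zero]
  unfold pvRowA
  congr 1
  rw [List.drop_take, PySem.List.slice_toNat keys hs0 he0]

-- ===== VERDICT (by name: the statement is the Claim_ definition above) =====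
theorem split_table_by_columns_spec : Claim_equal_split_table_by_columns := by
  intro table n _ hpre
  unfold Spec_split_table_by_columns
  by_cases htab : table = []
  · simp [split_table_by_columns, split_table_by_columns_alt, htab]
  · have hn0 : n ≠ 0 := hpre.1 htab
    rcases lt_or_gt_of_ne hn0 with hn | hn
    · have hr : PySem.List.pyRange 0 n 1 = [] := PySem.List.pyRange_one_eq_nil (by omega)
      simp [split_table_by_columns, split_table_by_columns_alt, htab, hr, hn.le]
    · obtain ⟨N, rfl⟩ : ∃ N : Nat, (N : Int) = n := ⟨n.toNat, Int.toNat_of_nonneg hn.le⟩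
      have hor : ¬ (table = [] ∨ (N : Int) ≤ 0) := by
        rintro (h | h)
        · exact htab h
        · omega
      simp only [split_table_by_columns, split_table_by_columns_alt, if_neg htab, if_neg hor]
      set keys := (PySem.Dict.ofList (table.headD [])).keys with hkeys
      set avg := PySem.Int.floordiv (keys.length : Int) (N : Int) with havg
      set rem := PySem.Int.mod (keys.length : Int) (N : Int) with hrem
      have hr0 : 0 ≤ rem := by
        rw [hrem, PySem.Int.mod_eq_emod_of_pos hn]
        exact Int.emod_nonneg _ (by omega)
      have hrn : rem < (N : Int) := by
        rw [hrem, PySem.Int.mod_eq_emod_of_pos hn]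
        exact Int.emod_lt_of_pos _ hn
      have hq0 : 0 ≤ avg := by
        rw [havg, PySem.Int.floordiv_eq_ediv_of_pos hn]
        exact Int.ediv_nonneg (by positivity) hn.le
      have heq : avg * (N : Int) + rem = (keys.length : Int) := by
        have h := PySem.Int.floordiv_mul_add_mod (keys.length : Int) (N : Int)
        rw [← havg, ← hrem] at h
        linarith
      have hN0 : ¬ (N = 0) := by omega
      have hdm' : ((PySem.Int.divmod? (keys.length : Int) (N : Int)).getD (0, 0)) = (avg, rem) := by
        rw [show PySem.Int.divmod? (keys.length : Int) (N : Int) = some (avg, rem) from by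
          simp [PySem.Int.divmod?, PySem.Int.floordiv, PySem.Int.mod, hN0, havg, hrem]]
        rfl
      rw [hdm']
      have hinit : (PySem.List.pyRange 0 (N : Int) 1).map
          (fun _ => ([] : List (List (String × String))))
          = (List.range N).map (fun _ => []) := by
        simp [PySem.List.pyRange_one, Function.comp_def, List.map_const']
      rw [hinit]
      rw [pv_A_inv _ table _ _ hr0 N N le_rfl]
      symm
      refine Eq.trans
        (pv_foldl_inv_congr (fun s => s.length = N) _
          (fun s row => s.mapIdx (fun g b => b ++
            [pvRowA row (PySem.List.slice keys
              (some ((g : Int) * avg + min (g : Int) rem))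
              (some (((g : Int) + 1) * avg + min ((g : Int) + 1) rem)))]))
          table _ (by simp) ?_) ?_
      · -- the per-row step: scatter + g-loop equals the mapIdx of projections
        intro s row hlen
        have hrowstep : ∀ f : Int → List (String × String),
            (PySem.List.pyRange 0 (N : Int) 1).foldl
              (fun s g => s.set g.toNat (s.getD g.toNat [] ++ [f g])) s
            = s.mapIdx (fun g b => if g < N then b ++ [f (g : Int)] else b) := by
          intro f
          rw [PySem.List.pyRange_one, List.foldl_map]
          simp only [zero_add, Int.toNat_natCast, Int.sub_zero]
          exact pv_gloop N (fun k => f (k : Int)) s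
        constructor
        · rw [hrowstep]
          apply List.ext_getElem (by simp)
          intro i h1 h2
          simp only [List.length_mapIdx] at h1
          simp only [List.getElem_mapIdx, Int.toNat_natCast]
          rw [if_pos (by omega)]
          congr 2
          exact pv_parts_items keys row (N : Int) avg rem hn hq0 hr0 hrn heq i
            (by rw [Int.toNat_natCast]; omega)
        · rw [hrowstep]
          simp [hlen]
      · -- collapse the rows fold and compare with A's closed form
        rw [pv_rows (fun row g => pvRowA row (PySem.List.slice keys
              (some ((g : Int) * avg + min (g : Int) rem))
              (some (((g : Int) + 1) * avg + min ((g : Int) + 1) rem)))) table]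
        apply List.ext_getElem (by simp)
        intro i h1 h2
        simp only [List.length_mapIdx, List.length_map, List.length_range] at h1
        simp only [List.getElem_mapIdx, List.getElem_map, List.getElem_range]
        rw [if_pos h1]
        simp
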